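-- pv_equiv track=rewrite | github.com/lugia574/algorism | venv/python_algo/code2(프로그래머스)/l3-숫자 게임.py | solution
-- ===== SOURCE A (Python) =====
-- def solution(A, B):
--     A.sort()
--     B.sort()
--
--     answer = 0
--
--     while A:
--         x = A[0]
--         tmp = []
--         for i in B:
--             if x < i:
--                 tmp.append(i)
--                 break
--         if len(tmp) != 0:
--             B.remove(min(tmp))
--             answer += 1
--         A.remove(x)
--
--     return answer
-- ===== SOURCE B (Python) =====
-- def solution(A, B):
--     # two-pointer greedy over sorted copies (does not mutate A or B, unlike A which sorts/empties them)
--     bs = sorted(B)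
--     j = 0
--     ans = 0
--     for a in sorted(A):
--         while j < len(bs) and bs[j] <= a:
--             j += 1
--         if j < len(bs):
--             ans += 1
--             j += 1
--     return ans
-- ===== Notes on version B (the rewrite author's own statement) =====
-- stated objective: faster
-- what changed: Replaced the per-element linear scan of B plus B.remove/min (quadratic) by a single two-pointer sweep that consumes a sorted copy of B once while iterating sorted A.
import Mathlib
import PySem

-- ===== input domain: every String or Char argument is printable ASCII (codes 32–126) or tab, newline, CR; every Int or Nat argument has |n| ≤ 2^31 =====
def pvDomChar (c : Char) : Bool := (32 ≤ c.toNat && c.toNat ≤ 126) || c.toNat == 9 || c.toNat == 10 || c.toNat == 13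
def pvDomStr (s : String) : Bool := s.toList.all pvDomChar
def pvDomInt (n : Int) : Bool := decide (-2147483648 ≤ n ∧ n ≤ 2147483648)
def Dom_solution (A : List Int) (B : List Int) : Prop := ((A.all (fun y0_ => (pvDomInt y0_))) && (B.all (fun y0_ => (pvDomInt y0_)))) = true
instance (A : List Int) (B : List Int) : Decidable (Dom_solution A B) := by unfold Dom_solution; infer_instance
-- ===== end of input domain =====

-- B replaces A's quadratic scan/remove over B by one two-pointer sweep (asymptotically faster);
-- equivalence is about the RETURN value only: Python A sorts and empties its arguments in place, B does not mutate them.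

-- ===== PORT A =====
-- while A: x = A[0]; tmp = first i in B with x < i (for-with-break); if tmp: B.remove(min(tmp)); answer += 1; A.remove(x).
-- A.remove(x) with x = A[0] removes index 0, i.e. the loop continues on the tail.
def loopA_solution : List Int → List Int → Int → Int
  | [], _, ans => ans
  | x :: rest, B, ans =>
      let tmp : List Int :=
        match B.find? (fun i => decide (x < i)) with
        | some i => [i]
        | none => []
      if tmp.length ≠ 0 then
        -- B.remove(min(tmp)): min(tmp) is always a member of B here, so remove? always succeeds
        loopA_solution rest ((PySem.List.remove? B ((PySem.List.min? tmp (fun y => y)).getD 0)).getD B) (ans + 1)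
      else
        loopA_solution rest B ans

def solution (A : List Int) (B : List Int) : Int :=
  loopA_solution (PySem.List.sorted A (fun y => y)) (PySem.List.sorted B (fun y => y)) 0

-- ===== PORT B =====
-- while j < len(bs) and bs[j] <= a: j += 1
def skipIdx_solution (bs : List Int) (a : Int) (j : Nat) : Nat :=
  if h : j < bs.length then
    (if bs[j] ≤ a then skipIdx_solution bs a (j + 1) else j)
  else j
termination_by bs.length - j

-- for a in sorted(A): advance j past elements ≤ a; if one is left, take it
def loopB_solution : List Int → List Int → Nat → Int → Int
  | [], _, _, ans => ans
  | a :: as_, bs, j, ans =>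
      let j' := skipIdx_solution bs a j
      if j' < bs.length then loopB_solution as_ bs (j' + 1) (ans + 1)
      else loopB_solution as_ bs j' ans

def solution_alt (A : List Int) (B : List Int) : Int :=
  loopB_solution (PySem.List.sorted A (fun y => y)) (PySem.List.sorted B (fun y => y)) 0 0

-- ===== PRECONDITION & SPEC =====
def Spec_solution (A : List Int) (B : List Int) (out : Int) : Prop := out = solution_alt A B
instance (A : List Int) (B : List Int) (out : Int) : Decidable (Spec_solution A B out) := by unfold Spec_solution; infer_instance

-- ===== CLAIM (what is proved, stated in full; the proofs are below) =====
def Claim_equal_solution : Prop := ∀ (A : List Int) (B : List Int), Dom_solution A B → Spec_solution A B (solution A B)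

-- ===== LEMMAS AND PROOFS =====

-- proof-only suffix view of B's loop: the pointer j is represented by the remaining suffix of bs
def skipLe_solution (a : Int) : List Int → List Int
  | [] => []
  | b :: bs => if b ≤ a then skipLe_solution a bs else b :: bs

def loopS_solution : List Int → List Int → Int → Int
  | [], _, ans => ans
  | a :: as_, bs, ans =>
      match skipLe_solution a bs with
      | [] => loopS_solution as_ [] ans
      | _ :: bs' => loopS_solution as_ bs' (ans + 1)

lemma find?_eq_head_skipLe (a : Int) (R : List Int) :
    R.find? (fun i => decide (a < i)) = (skipLe_solution a R).head? := by
  induction R with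
  | nil => rfl
  | cons b R ih =>
      by_cases h : b ≤ a
      · have : ¬ a < b := not_lt.mpr h
        simp [List.find?, skipLe_solution, this, h, ih]
      · have : a < b := lt_of_not_ge h
        simp [List.find?, skipLe_solution, this, h]

lemma skipLe_decomp (a : Int) (R : List Int) :
    ∃ P2, R = P2 ++ skipLe_solution a R ∧ ∀ p ∈ P2, p ≤ a := by
  induction R with
  | nil => exact ⟨[], by simp [skipLe_solution]⟩
  | cons b R ih =>
      by_cases h : b ≤ a
      · obtain ⟨P2, hR, hP2⟩ := ih
        refine ⟨b :: P2, ?_, ?_⟩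
        · simp [skipLe_solution, h, ← hR]
        · intro p hp
          rcases List.mem_cons.mp hp with rfl | hp
          · exact h
          · exact hP2 p hp
      · exact ⟨[], by simp [skipLe_solution, h]⟩

lemma skipLe_head_gt (a : Int) (R : List Int) (b : Int) (t : List Int)
    (h : skipLe_solution a R = b :: t) : a < b := by
  induction R with
  | nil => simp [skipLe_solution] at h
  | cons c R ih =>
      by_cases hc : c ≤ a
      · simp [skipLe_solution, hc] at h
        exact ih h
      · simp [skipLe_solution, hc] at h
        exact h.1 ▸ lt_of_not_ge hc

-- A's loop on P ++ R equals B's suffix loop on R when every element of P is ≤ every remaining a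
lemma gen_solution (A : List Int) :
    ∀ (P R : List Int) (ans : Int),
      A.Pairwise (· ≤ ·) →
      (∀ p ∈ P, ∀ a ∈ A, p ≤ a) →
      loopA_solution A (P ++ R) ans = loopS_solution A R ans := by
  induction A with
  | nil => intro P R ans _ _; rfl
  | cons a A' ih =>
      intro P R ans hA hP
      have hPa : ∀ p ∈ P, p ≤ a := fun p hp => hP p hp a (List.mem_cons_self)
      have haA' : ∀ a' ∈ A', a ≤ a' := fun a' ha' => List.rel_of_pairwise_cons hA ha'
      have hA' : A'.Pairwise (· ≤ ·) := hA.of_cons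
      have hfindP : P.find? (fun i => decide (a < i)) = none := by
        apply List.find?_eq_none.mpr
        intro p hp
        simpa using not_lt.mpr (hPa p hp)
      have hfind : (P ++ R).find? (fun i => decide (a < i)) = (skipLe_solution a R).head? := by
        simp [List.find?_append, hfindP, find?_eq_head_skipLe]
      obtain ⟨P2, hR, hP2⟩ := skipLe_decomp a R
      cases hsk : skipLe_solution a R with
      | nil =>
          have hRle : ∀ p ∈ R, p ≤ a := by
            intro p hp
            rw [hR, hsk, List.append_nil] at hp
            exact hP2 p hp
          have : loopA_solution (a :: A') (P ++ R) ans = loopA_solution A' (P ++ R) ans := by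
            simp [loopA_solution, hfind, hsk]
          rw [this]
          have : loopS_solution (a :: A') R ans = loopS_solution A' [] ans := by
            simp [loopS_solution, hsk]
          rw [this, ← ih (P ++ R) [] ans hA' ?_, List.append_nil]
          intro p hp a' ha'
          rcases List.mem_append.mp hp with hp | hp
          · exact hP p hp a' (List.mem_cons_of_mem a ha')
          · exact le_trans (hRle p hp) (haA' a' ha')
      | cons b R2' =>
          have hab : a < b := skipLe_head_gt a R b R2' hsk
          have hbP : b ∉ P := fun hb => absurd hab (not_lt.mpr (hPa b hb))
          have hbP2 : b ∉ P2 := fun hb => absurd hab (not_lt.mpr (hP2 b hb))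
          have hmemb : b ∈ P ++ R := by
            rw [hR, hsk]; simp
          have herase : (P ++ R).erase b = P ++ P2 ++ R2' := by
            rw [hR, hsk, ← List.append_assoc,
              List.erase_append_right _ (by
                intro hb
                rcases List.mem_append.mp hb with hb | hb
                · exact hbP hb
                · exact hbP2 hb),
              List.erase_cons_head]
          have hstepA : loopA_solution (a :: A') (P ++ R) ans
              = loopA_solution A' (P ++ P2 ++ R2') (ans + 1) := by
            simp only [loopA_solution, hfind, hsk, List.head?_cons]
            have hmin : (PySem.List.min? [b] (fun y => y)).getD 0 = b := by
              simp [PySem.List.min?]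
            simp only [hmin, PySem.List.remove?_eq_some_erase _ _ hmemb, herase]
            simp
          rw [hstepA]
          have hstepS : loopS_solution (a :: A') R ans = loopS_solution A' R2' (ans + 1) := by
            simp [loopS_solution, hsk]
          rw [hstepS]
          apply ih (P ++ P2) R2' (ans + 1) hA'
          intro p hp a' ha'
          rcases List.mem_append.mp hp with hp | hp
          · exact hP p hp a' (List.mem_cons_of_mem a ha')
          · exact le_trans (hP2 p hp) (haA' a' ha')

-- the index-based loop of port B equals the suffix view
lemma skipIdx_drop (bs : List Int) (a : Int) (j : Nat) :
    bs.drop (skipIdx_solution bs a j) = skipLe_solution a (bs.drop j) := by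
  fun_induction skipIdx_solution bs a j with
  | case1 j h hle ih =>
      rw [ih]
      have hdj : bs.drop j = bs[j] :: bs.drop (j + 1) := List.drop_eq_getElem_cons h
      rw [hdj]
      simp [skipLe_solution, hle]
  | case2 j h hle =>
      have hdj : bs.drop j = bs[j] :: bs.drop (j + 1) := List.drop_eq_getElem_cons h
      rw [hdj]
      simp [skipLe_solution, hle]
  | case3 j h =>
      rw [List.drop_eq_nil_of_le (le_of_not_gt h)]
      rfl

lemma skipIdx_le_length (bs : List Int) (a : Int) (j : Nat) (hj : j ≤ bs.length) :
    skipIdx_solution bs a j ≤ bs.length := by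
  fun_induction skipIdx_solution bs a j with
  | case1 j h hle ih => exact ih h
  | case2 j h hle => exact le_of_lt h
  | case3 j h => exact hj

lemma loopB_eq_loopS (A : List Int) :
    ∀ (bs : List Int) (j : Nat) (ans : Int), j ≤ bs.length →
      loopB_solution A bs j ans = loopS_solution A (bs.drop j) ans := by
  induction A with
  | nil => intro bs j ans _; rfl
  | cons a A' ih =>
      intro bs j ans hj
      have hdrop := skipIdx_drop bs a j
      have hle := skipIdx_le_length bs a j hj
      by_cases h : skipIdx_solution bs a j < bs.length
      · have hne : bs.drop (skipIdx_solution bs a j) ≠ [] := by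
          simp [List.drop_eq_nil_iff]; omega
        obtain ⟨b, t, hbt⟩ := List.exists_cons_of_ne_nil hne
        have htail : bs.drop (skipIdx_solution bs a j + 1) = t := by
          have h2 : (bs.drop (skipIdx_solution bs a j)).tail
              = bs.drop (skipIdx_solution bs a j + 1) := List.tail_drop
          rw [hbt] at h2
          simpa using h2.symm
        simp only [loopB_solution, loopS_solution, h, if_true, ← hdrop, hbt]
        rw [ih bs _ (ans + 1) h, htail]
      · have hnil : bs.drop (skipIdx_solution bs a j) = [] :=
          List.drop_eq_nil_of_le (by omega)
        simp only [loopB_solution, loopS_solution, h, if_false, ← hdrop, hnil]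
        rw [ih bs _ ans hle, hnil]

-- ===== VERDICT (by name: the statement is the Claim_ definition above) =====
theorem solution_spec : Claim_equal_solution := by
  intro A B _
  unfold Spec_solution solution solution_alt
  rw [loopB_eq_loopS _ _ 0 0 (Nat.zero_le _), List.drop_zero]
  exact gen_solution _ []  _ 0
    (by simpa using PySem.List.sorted_pairwise A (fun y => y))
    (by simp)
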